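-- pv_equiv track=rewrite | github.com/inaciovasquez2020/overlap-rigidity-counterexamples | scripts/local_cycle_rank.py | local_short_cycles
-- ===== SOURCE A (Python) =====
-- def local_short_cycles(adj, max_len=6):
--     """
--     Count short cycles through each vertex up to length max_len.
--     Very naive DFS-based enumeration; small graphs only.
--     """
--     def dfs(start, u, depth, visited):
--         if depth == 0:
--             return 1 if start in adj[u] else 0
--         cnt = 0
--         for v in adj[u]:
--             if v not in visited:
--                 cnt += dfs(start, v, depth - 1, visited | {v})
--         return cnt
--
--     per_v = {}
--     for v in adj:
--         total = 0
--         for ell in range(3, max_len + 1):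
--             total += dfs(v, v, ell - 1, {v})
--         per_v[v] = total // 2  # undirected correction
--     return per_v
-- ===== SOURCE B (Python) =====
-- def local_short_cycles(adj, max_len=6):
--     """
--     Count short cycles through each vertex up to length max_len.
--     One DFS per start vertex: walk simple paths of up to max_len-1 edges,
--     and count a cycle whenever the path has >= 2 edges and closes back to start.
--     """
--     def walk(u, e, visited, start):
--         total = 1 if e >= 2 and start in adj[u] else 0
--         if e < max_len - 1:
--             for w in adj[u]:
--                 if w not in visited:
--                     total += walk(w, e + 1, visited | {w}, start)
--         return total
--
--     return {v: walk(v, 0, {v}, v) // 2 for v in adj}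
-- ===== Notes on version B (the rewrite author's own statement) =====
-- stated objective: faster
-- what changed: Instead of re-running a fixed-depth DFS for every target cycle length ell in 3..max_len, B does a single DFS per start vertex that walks simple paths of up to max_len-1 edges and counts a closure back to the start at every intermediate depth >= 2.
import Mathlib
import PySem

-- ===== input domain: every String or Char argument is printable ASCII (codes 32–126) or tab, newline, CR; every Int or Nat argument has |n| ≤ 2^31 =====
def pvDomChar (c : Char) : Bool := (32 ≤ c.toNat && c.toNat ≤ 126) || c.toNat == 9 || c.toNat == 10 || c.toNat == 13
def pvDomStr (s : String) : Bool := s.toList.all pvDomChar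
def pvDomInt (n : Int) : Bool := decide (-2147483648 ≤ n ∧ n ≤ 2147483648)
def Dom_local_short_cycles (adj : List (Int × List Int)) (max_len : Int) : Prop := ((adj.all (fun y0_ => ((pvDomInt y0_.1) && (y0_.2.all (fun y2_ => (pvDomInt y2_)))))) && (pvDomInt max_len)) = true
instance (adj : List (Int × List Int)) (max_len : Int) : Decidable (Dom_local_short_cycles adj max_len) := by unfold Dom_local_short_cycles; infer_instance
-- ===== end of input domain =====

-- B replaces A's per-length restart of the DFS (one fixed-depth DFS for each ell in 3..max_len)
-- by ONE depth-bounded DFS per start vertex that tests closure at every depth ≥ 2 (objective: faster by the factor max_len-2 of repeated traversals).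

-- ===== PORT A =====
-- adj[u]: Python raises KeyError when u is not a key of adj; Pre_ excludes exactly those inputs, so the [] default is never used inside Pre_.
def pvAdj (adj : List (Int × List Int)) (u : Int) : List Int :=
  (PySem.Dict.mk adj).getD u []

-- A's dfs(start, u, depth, visited); depth is a Nat here: A only ever calls it with depth = ell-1 ≥ 2 and decrements to 0, exact on those calls.
def pvDfs (adj : List (Int × List Int)) (start u : Int) (depth : Nat) (visited : PySem.Set Int) : Int :=
  match depth with
  | 0 => if start ∈ pvAdj adj u then 1 else 0
  | Nat.succ d =>
      (pvAdj adj u).foldl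
        (fun cnt v => if v ∈ visited then cnt else cnt + pvDfs adj start v d (PySem.Set.add visited v)) 0

def local_short_cycles (adj : List (Int × List Int)) (max_len : Int) : List (Int × Int) :=
  (((PySem.Dict.mk adj).keys).foldl
    (fun per_v v =>
      per_v.insert v
        (PySem.Int.floordiv
          ((PySem.List.pyRange 3 (max_len + 1) 1).foldl
            (fun total ell => total + pvDfs adj v v (ell - 1).toNat (PySem.Set.add PySem.Set.empty v)) 0)
          2))
    PySem.Dict.empty).items

-- ===== PORT B =====
-- B's walk(u, e, visited, start): one DFS, closure tested at every e ≥ 2, recursion bounded by e < max_len - 1.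
def pvWalk (adj : List (Int × List Int)) (max_len start u e : Int) (visited : PySem.Set Int) : Int :=
  let total := if 2 ≤ e ∧ start ∈ pvAdj adj u then 1 else 0
  if _h : e < max_len - 1 then
    (pvAdj adj u).foldl
      (fun t w => if w ∈ visited then t else t + pvWalk adj max_len start w (e + 1) (PySem.Set.add visited w)) total
  else total
termination_by (max_len - 1 - e).toNat
decreasing_by omega

-- B's dict comprehension over the keys of adj; with Nodup keys (Pre_) this map is exactly the resulting dict's items.
def local_short_cycles_alt (adj : List (Int × List Int)) (max_len : Int) : List (Int × Int) :=
  ((PySem.Dict.mk adj).keys).map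
    (fun v => (v, PySem.Int.floordiv (pvWalk adj max_len v v 0 (PySem.Set.add PySem.Set.empty v)) 2))

-- ===== PRECONDITION & SPEC =====
-- Pre_ excludes (a) association lists with duplicate keys, which do not correspond to a Python dict, and
-- (b) inputs with a neighbor that is not a key of adj when 3 ≤ max_len: A itself raises KeyError on exactly those.
def Pre_local_short_cycles (adj : List (Int × List Int)) (max_len : Int) : Prop :=
  (adj.map (·.1)).Nodup ∧ (3 ≤ max_len → ∀ p ∈ adj, ∀ w ∈ p.2, w ∈ adj.map (·.1))
instance (adj : List (Int × List Int)) (max_len : Int) : Decidable (Pre_local_short_cycles adj max_len) := by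
  unfold Pre_local_short_cycles; infer_instance

def pvWitness_local_short_cycles : (List (Int × List Int)) × Int :=
  ([(0, [1, 2]), (1, [0, 2]), (2, [0, 1])], 6)

def Spec_local_short_cycles (adj : List (Int × List Int)) (max_len : Int) (out : List (Int × Int)) : Prop := out = local_short_cycles_alt adj max_len
instance (adj : List (Int × List Int)) (max_len : Int) (out : List (Int × Int)) : Decidable (Spec_local_short_cycles adj max_len out) := by unfold Spec_local_short_cycles; infer_instance

-- ===== CLAIM (what is proved, stated in full; the proofs are below) =====
def Claim_equal_local_short_cycles : Prop := ∀ (adj : List (Int × List Int)) (max_len : Int), Dom_local_short_cycles adj max_len → Pre_local_short_cycles adj max_len → Spec_local_short_cycles adj max_len (local_short_cycles adj max_len)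

-- ===== LEMMAS AND PROOFS =====

-- swap a list sum of range sums
theorem pv_sum_swap {α : Type} (l : List α) (n : Nat) (f : α → Nat → Int) :
    (l.map (fun w => ∑ d ∈ Finset.range n, f w d)).sum
      = ∑ d ∈ Finset.range n, (l.map (fun w => f w d)).sum := by
  induction l with
  | nil => simp
  | cons a t ih => simp [ih, Finset.sum_add_distrib]

theorem pvDfs_succ (adj : List (Int × List Int)) (start u : Int) (d : Nat) (visited : PySem.Set Int) :
    pvDfs adj start u (d + 1) visited
      = ((pvAdj adj u).map
          (fun w => if w ∈ visited then 0 else pvDfs adj start w d (PySem.Set.add visited w))).sum := by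
  have hcg : (pvAdj adj u).foldl
        (fun cnt v => if v ∈ visited then cnt else cnt + pvDfs adj start v d (PySem.Set.add visited v)) 0
      = (pvAdj adj u).foldl
        (fun cnt v => cnt + (if v ∈ visited then 0 else pvDfs adj start v d (PySem.Set.add visited v))) 0 :=
    PySem.List.foldl_congr_mem _ _ _ _ (by intro acc x _; split <;> simp)
  show (pvAdj adj u).foldl _ 0 = _
  rw [hcg, PySem.List.foldl_add]
  simp

theorem pvWalk_eq_sum (adj : List (Int × List Int)) (max_len start : Int) :
    ∀ (b : Nat) (u e : Int) (visited : PySem.Set Int), (max_len - 1 - e).toNat = b →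
      pvWalk adj max_len start u e visited
        = ∑ d ∈ Finset.range (b + 1),
            (if 2 ≤ e + (d : Int) then pvDfs adj start u d visited else 0) := by
  intro b
  induction b with
  | zero =>
    intro u e visited hb
    rw [pvWalk, dif_neg (by omega)]
    simp only [Nat.zero_add, Finset.range_one, Finset.sum_singleton, Nat.cast_zero, add_zero]
    by_cases h2 : 2 ≤ e
    · simp [pvDfs, h2]
    · simp [h2]
  | succ b ih =>
    intro u e visited hb
    rw [pvWalk, dif_pos (by omega)]
    have hcg : (pvAdj adj u).foldl
          (fun t w => if w ∈ visited then t
                      else t + pvWalk adj max_len start w (e + 1) (PySem.Set.add visited w))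
          (if 2 ≤ e ∧ start ∈ pvAdj adj u then 1 else 0)
        = (pvAdj adj u).foldl
          (fun t w => t + (if w ∈ visited then 0
                      else pvWalk adj max_len start w (e + 1) (PySem.Set.add visited w)))
          (if 2 ≤ e ∧ start ∈ pvAdj adj u then 1 else 0) :=
      PySem.List.foldl_congr_mem _ _ _ _ (by intro acc x _; split <;> simp)
    rw [hcg, PySem.List.foldl_add]
    have hmap : ((pvAdj adj u).map
        (fun w => if w ∈ visited then 0
                  else pvWalk adj max_len start w (e + 1) (PySem.Set.add visited w)))
        = (pvAdj adj u).map
            (fun w => ∑ d ∈ Finset.range (b + 1),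
              (if w ∈ visited then 0
               else if 2 ≤ (e + 1) + (d : Int) then pvDfs adj start w d (PySem.Set.add visited w) else 0)) := by
      apply List.map_congr_left
      intro w _
      by_cases hw : w ∈ visited
      · simp [hw]
      · simp only [hw, if_false]
        exact ih w (e + 1) (PySem.Set.add visited w) (by omega)
    rw [hmap, pv_sum_swap]
    rw [Finset.sum_range_succ' (fun d => if 2 ≤ e + (d : Int) then pvDfs adj start u d visited else 0)]
    have h0 : (if 2 ≤ e + ((0 : Nat) : Int) then pvDfs adj start u 0 visited else 0)
        = (if 2 ≤ e ∧ start ∈ pvAdj adj u then 1 else 0) := by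
      by_cases h2 : 2 ≤ e
      · simp [pvDfs, h2]
      · simp [h2]
    rw [h0, add_comm]
    congr 1
    apply Finset.sum_congr rfl
    intro d _
    by_cases hc : 2 ≤ (e + 1) + (d : Int)
    · rw [if_pos (show 2 ≤ e + (((d : Nat) + 1 : Nat) : Int) by push_cast; omega)]
      rw [pvDfs_succ]
      congr 1
      apply List.map_congr_left
      intro w _
      by_cases hw : w ∈ visited
      · simp [hw]
      · simp [hw, hc]
    · rw [if_neg (show ¬ 2 ≤ e + (((d : Nat) + 1 : Nat) : Int) by push_cast; omega)]
      simp [hc]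

-- (List sums over range and Finset sums over range coincide definitionally)
theorem pv_sum_list_range (n : Nat) (f : Nat → Int) :
    ((List.range n).map f).sum = ∑ i ∈ Finset.range n, f i := rfl

theorem pv_shift (n : Nat) (F : Nat → Int) (h0 : F 0 = 0) (h1 : F 1 = 0) :
    ∑ d ∈ Finset.range (n + 2), F d = ∑ i ∈ Finset.range n, F (i + 2) := by
  rw [Finset.sum_range_succ' F (n + 1), Finset.sum_range_succ' (fun d => F (d + 1)) n, h0, h1]
  simp

-- A's per-start total (the ell-loop of dfs calls) equals B's single walk from the same start.
theorem pv_total_eq (adj : List (Int × List Int)) (max_len v : Int) (s : PySem.Set Int) :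
    (PySem.List.pyRange 3 (max_len + 1) 1).foldl
        (fun total ell => total + pvDfs adj v v (ell - 1).toNat s) 0
      = pvWalk adj max_len v v 0 s := by
  rw [pvWalk_eq_sum adj max_len v ((max_len - 1).toNat) v 0 s (by omega)]
  rw [PySem.List.foldl_add]
  by_cases h : max_len ≤ 2
  · rw [PySem.List.pyRange_one_eq_nil (by omega)]
    simp only [List.map_nil, List.sum_nil, zero_add]
    symm
    apply Finset.sum_eq_zero
    intro d hd
    have hd1 : d ≤ 1 := by
      have := Finset.mem_range.mp hd
      omega
    rw [if_neg (by omega)]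
  · have hN : (max_len - 1).toNat + 1 = (max_len - 2).toNat + 2 := by omega
    rw [hN, pv_shift _ _ (by norm_num) (by norm_num)]
    rw [PySem.List.pyRange_one, List.map_map, pv_sum_list_range]
    have hn : ((max_len + 1) - 3).toNat = (max_len - 2).toNat := by omega
    rw [hn, zero_add]
    apply Finset.sum_congr rfl
    intro i _
    simp only [Function.comp]
    rw [if_pos (by push_cast; omega)]
    congr 1
    omega

-- ===== VERDICT (by name: the statement is the Claim_ definition above) =====
theorem local_short_cycles_spec : Claim_equal_local_short_cycles := by
  intro adj max_len _ hpre
  show local_short_cycles adj max_len = local_short_cycles_alt adj max_len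
  unfold local_short_cycles local_short_cycles_alt
  have hfresh := PySem.Dict.items_foldl_insert_fresh
        ((PySem.Dict.mk adj).keys)
        (fun (v : Int) => v)
        (fun (v : Int) =>
          PySem.Int.floordiv
            ((PySem.List.pyRange 3 (max_len + 1) 1).foldl
              (fun total ell => total + pvDfs adj v v (ell - 1).toNat (PySem.Set.add PySem.Set.empty v)) 0)
            2)
        PySem.Dict.empty
        (by intro a _; simp)
        (by simpa [PySem.Dict.keys] using hpre.1)
  rw [hfresh]
  have hempty : (PySem.Dict.empty : PySem.Dict Int Int).items = [] := rfl
  rw [hempty, List.nil_append]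
  apply List.map_congr_left
  intro v _
  simp only [pv_total_eq]
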